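-- pv_equiv track=rewrite | github.com/winxos/nowcoder | python/t10.py | code_to_int
-- ===== SOURCE A (Python) =====
-- def code_to_int(ss:str):
--     n=0
--     for i in ss:
--         if i=='.':
--             n=n*2+1
--         if i=='-':
--             n=n*2
--     return n
-- ===== SOURCE B (Python) =====
-- def code_to_int(ss: str):
--     bits = ''.join('1' if c == '.' else '0' for c in ss if c in '.-')
--     return int(bits, 2) if bits else 0
-- ===== Notes on version B (the rewrite author's own statement) =====
-- stated objective: idiomatic
-- what changed: Replaces the Horner-style per-character accumulation with building a binary digit string (filtering to '.'/'-') and parsing it once with int(bits, 2), returning 0 for empty bits.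
import Mathlib
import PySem

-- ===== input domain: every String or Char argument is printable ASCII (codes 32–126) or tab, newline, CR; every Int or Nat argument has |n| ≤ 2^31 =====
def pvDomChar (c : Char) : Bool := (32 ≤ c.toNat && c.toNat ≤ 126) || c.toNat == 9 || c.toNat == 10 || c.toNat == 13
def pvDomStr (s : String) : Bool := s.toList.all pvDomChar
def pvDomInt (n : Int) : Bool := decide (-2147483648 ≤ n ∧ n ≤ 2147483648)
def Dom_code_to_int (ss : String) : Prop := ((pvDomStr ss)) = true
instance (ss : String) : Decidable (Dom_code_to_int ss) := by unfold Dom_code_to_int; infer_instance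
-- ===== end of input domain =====

-- B builds a binary digit string with int(bits,2) instead of A's Horner accumulation; idiomatic, same cost.

-- ===== PORT A =====
-- loop body of A (the two ifs, in order)
def ctiStepA (n : Int) (i : Char) : Int :=
  let n := if i = '.' then n * 2 + 1 else n
  if i = '-' then n * 2 else n

def code_to_int (ss : String) : Int :=
  ss.toList.foldl ctiStepA 0

-- ===== PORT B =====
-- bits string: '1' for '.', '0' for '-', others dropped
def ctiBits (ss : String) : List Char :=
  (ss.toList.filter (fun c => c = '.' ∨ c = '-')).map (fun c => if c = '.' then '1' else '0')

-- hand port of int(bits, 2): base-2 left fold over the digits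
def ctiStepB (acc : Int) (c : Char) : Int := acc * 2 + (if c = '1' then 1 else 0)

def ctiParse2 (bs : List Char) : Int :=
  bs.foldl ctiStepB 0

def code_to_int_alt (ss : String) : Int :=
  let bits := ctiBits ss
  if bits = [] then 0 else ctiParse2 bits

-- ===== PRECONDITION & SPEC =====
def Spec_code_to_int (ss : String) (out : Int) : Prop := out = code_to_int_alt ss
instance (ss : String) (out : Int) : Decidable (Spec_code_to_int ss out) := by unfold Spec_code_to_int; infer_instance

-- ===== CLAIM (what is proved, stated in full; the proofs are below) =====
def Claim_equal_code_to_int : Prop := ∀ (ss : String), Dom_code_to_int ss → Spec_code_to_int ss (code_to_int ss)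

-- ===== LEMMAS AND PROOFS =====

lemma cti_alt_eq (ss : String) : code_to_int_alt ss = ctiParse2 (ctiBits ss) := by
  unfold code_to_int_alt
  by_cases h : ctiBits ss = [] <;> simp [h, ctiParse2]

lemma cti_key (l : List Char) (n : Int) :
    l.foldl ctiStepA n
    = ((l.filter (fun c => c = '.' ∨ c = '-')).map (fun c => if c = '.' then '1' else '0')).foldl
        ctiStepB n := by
  induction l generalizing n with
  | nil => rfl
  | cons c t ih =>
    rw [List.foldl_cons, List.filter_cons]
    by_cases h1 : c = '.'
    · subst h1
      rw [if_pos (by decide), List.map_cons, List.foldl_cons]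
      have hs : ctiStepA n '.' = ctiStepB n (if ('.' : Char) = '.' then '1' else '0') := by
        simp [ctiStepA, ctiStepB]
      rw [hs]; exact ih _
    · by_cases h2 : c = '-'
      · subst h2
        rw [if_pos (by decide), List.map_cons, List.foldl_cons]
        have hs : ctiStepA n '-' = ctiStepB n (if ('-' : Char) = '.' then '1' else '0') := by
          simp [ctiStepA, ctiStepB]
        rw [hs]; exact ih _
      · rw [if_neg (by simp [h1, h2])]
        have hs : ctiStepA n c = n := by simp [ctiStepA, h1, h2]
        rw [hs]; exact ih n

-- ===== VERDICT (by name: the statement is the Claim_ definition above) =====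
theorem code_to_int_spec : Claim_equal_code_to_int := by
  intro ss _
  unfold Spec_code_to_int
  rw [cti_alt_eq]
  unfold code_to_int ctiBits ctiParse2
  exact cti_key _ _
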